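-- pv_equiv track=rewrite | github.com/TypeQuicker/character_sequence | scripts/archive/mock_test.py | format_common_words
-- ===== SOURCE A (Python) =====
-- def format_common_words(words, repeat_count=3):
--     """Format a set of words into a comma-separated string with repetition."""
--     word_list = list(words)
--
--     if not word_list:
--         return ""
--
--     # If we have fewer words than needed, repeat the first word
--     result = []
--     first_word = word_list[0]
--
--     # Add words from our list until we run out or hit repeat_count
--     for i in range(repeat_count):
--         if i < len(word_list):
--             result.append(word_list[i])
--         else:
--             result.append(first_word)
--
--     return ", ".join(result)
-- ===== SOURCE B (Python) =====
-- def format_common_words(words, repeat_count=3):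
--     """Format a set of words into a comma-separated string with repetition."""
--     word_list = list(words)
--     if not word_list or repeat_count <= 0:
--         return ""
--     pad = max(0, repeat_count - len(word_list))
--     return ", ".join(word_list[:repeat_count] + [word_list[0]] * pad)
-- ===== Notes on version B (the rewrite author's own statement) =====
-- stated objective: simpler
-- what changed: B builds the output list in closed form (slice of the first repeat_count words plus list-multiplication padding with the first word) instead of an indexed loop with a per-iteration branch.
import Mathlib
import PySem

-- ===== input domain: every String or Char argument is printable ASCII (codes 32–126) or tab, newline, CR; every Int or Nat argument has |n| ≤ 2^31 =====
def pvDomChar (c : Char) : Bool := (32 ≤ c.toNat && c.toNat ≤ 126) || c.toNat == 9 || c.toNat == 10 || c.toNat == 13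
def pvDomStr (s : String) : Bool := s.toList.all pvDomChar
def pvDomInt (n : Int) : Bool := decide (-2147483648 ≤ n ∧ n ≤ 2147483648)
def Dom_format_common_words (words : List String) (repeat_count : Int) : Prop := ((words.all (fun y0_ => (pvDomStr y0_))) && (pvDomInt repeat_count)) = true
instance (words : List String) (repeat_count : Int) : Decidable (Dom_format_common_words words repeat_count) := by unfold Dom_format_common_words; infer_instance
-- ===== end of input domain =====

-- B replaces A's indexed loop (per-index branch, element-by-element append) by a closed-form
-- list assembly: a slice of the first repeat_count words plus replication padding (objective: simpler).


-- ===== PORT A =====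
def format_common_words (words : List String) (repeat_count : Int) : String :=
  let word_list := words
  if word_list = [] then ""
  else
    let first_word := word_list.headD ""
    let result := (PySem.List.pyRange 0 repeat_count 1).foldl
      (fun acc i =>
        if i < (word_list.length : Int) then acc ++ [PySem.List.pyGetD word_list i ""]
        else acc ++ [first_word]) []
    PySem.Str.join ", " result

-- ===== PORT B =====
def format_common_words_alt (words : List String) (repeat_count : Int) : String :=
  let word_list := words
  if word_list = [] ∨ repeat_count ≤ 0 then ""
  else
    let pad := max 0 (repeat_count - (word_list.length : Int))
    PySem.Str.join ", "
      (PySem.List.slice word_list none (some repeat_count) ++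
        PySem.List.pyRepeat [word_list.headD ""] pad)

-- ===== PRECONDITION & SPEC =====
def Spec_format_common_words (words : List String) (repeat_count : Int) (out : String) : Prop := out = format_common_words_alt words repeat_count
instance (words : List String) (repeat_count : Int) (out : String) : Decidable (Spec_format_common_words words repeat_count out) := by unfold Spec_format_common_words; infer_instance

-- ===== CLAIM (what is proved, stated in full; the proofs are below) =====
def Claim_equal_format_common_words : Prop := ∀ (words : List String) (repeat_count : Int), Dom_format_common_words words repeat_count → Spec_format_common_words words repeat_count (format_common_words words repeat_count)

-- ===== LEMMAS AND PROOFS =====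

-- The per-index loop body, as a function of the (Nat) index, yields take-plus-replicate.
lemma fcw_map_range (words : List String) (n : Nat) :
    (List.range n).map (fun (k : Nat) => if (k : Int) < (words.length : Int)
        then PySem.List.pyGetD words (k : Int) "" else words.headD "") =
      words.take n ++ List.replicate (n - words.length) (words.headD "") := by
  induction n with
  | zero => simp
  | succ n ih =>
    rw [List.range_succ, List.map_append, ih, List.map_singleton]
    by_cases h : n < words.length
    · have hc : ((n : Int) < (words.length : Int)) := by exact_mod_cast h
      rw [if_pos hc, PySem.List.pyGetD_eq_getElem words "" (by exact_mod_cast Nat.zero_le n) hc,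
        Nat.sub_eq_zero_of_le (Nat.le_of_lt h), Nat.sub_eq_zero_of_le (Nat.succ_le_of_lt h),
        List.replicate_zero, List.append_nil, List.append_nil,
        List.take_add_one, List.getElem?_eq_getElem h]
      simp
    · have h1 : ¬ ((n : Int) < (words.length : Int)) := by
        exact_mod_cast not_lt.mpr (not_lt.mp h)
      have h2 : n + 1 - words.length = (n - words.length) + 1 := by omega
      rw [if_neg h1, List.take_of_length_le (not_lt.mp h),
        List.take_of_length_le (Nat.le_succ_of_le (not_lt.mp h)),
        h2, List.replicate_succ' (n := n - words.length), List.append_assoc]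

theorem format_common_words_spec : Claim_equal_format_common_words := by
  intro words rc _
  unfold Spec_format_common_words format_common_words format_common_words_alt
  by_cases hw : words = []
  · simp [hw]
  · by_cases hrc : rc ≤ 0
    · have hnil : PySem.List.pyRange 0 rc 1 = [] := PySem.List.pyRange_one_eq_nil hrc
      simp only [if_neg hw, if_pos (Or.inr hrc), hnil, List.foldl_nil]
      rfl
    · rw [not_le] at hrc
      simp only [if_neg hw, if_neg (by simp [hw, not_le.mpr hrc] : ¬ (words = [] ∨ rc ≤ 0))]
      congr 1
      -- the two-branch loop step appends a single conditional element
      have hstep : (fun (acc : List String) (i : Int) =>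
            if i < (words.length : Int) then acc ++ [PySem.List.pyGetD words i ""]
            else acc ++ [words.headD ""]) =
          fun acc i => acc ++ [if i < (words.length : Int)
            then PySem.List.pyGetD words i "" else words.headD ""] := by
        funext acc i; split_ifs <;> rfl
      rw [hstep, PySem.List.foldl_append_singleton_eq_map, List.nil_append,
          PySem.List.pyRange_one, List.map_map]
      have hz : (fun (k : Nat) => if ((0 : Int) + k) < (words.length : Int)
            then PySem.List.pyGetD words ((0 : Int) + k) "" else words.headD "") =
          (fun (k : Nat) => if (k : Int) < (words.length : Int)
            then PySem.List.pyGetD words (k : Int) "" else words.headD "") := by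
        funext k; rw [Int.zero_add]
      simp only [Function.comp_def]
      rw [hz, fcw_map_range words, PySem.List.slice_to words (le_of_lt hrc),
          PySem.List.pyRepeat_singleton]
      congr 2 <;> omega
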